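-- pv_equiv track=rewrite | github.com/JonaVDM/hz-1.2-pgm2 | wk8ex2.py | end_other
-- ===== SOURCE A (Python) =====
-- def end_other(a, b):
--     l = min(len(a), len(b))
--     x = a[::-1].lower()
--     y = b[::-1].lower()
--     for i in range(l):
--         if x[i] != y[i]:
--             return False
--     return True
-- ===== SOURCE B (Python) =====
-- def end_other(a, b):
--     a = a.lower()
--     b = b.lower()
--     return a.endswith(b) or b.endswith(a)
-- ===== Notes on version B (the rewrite author's own statement) =====
-- stated objective: idiomatic
-- what changed: B lowercases both strings and asks the string API directly whether one ends with the other, removing A's reversal of both strings and the explicit per-index Python loop over the shorter length.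
import Mathlib
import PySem

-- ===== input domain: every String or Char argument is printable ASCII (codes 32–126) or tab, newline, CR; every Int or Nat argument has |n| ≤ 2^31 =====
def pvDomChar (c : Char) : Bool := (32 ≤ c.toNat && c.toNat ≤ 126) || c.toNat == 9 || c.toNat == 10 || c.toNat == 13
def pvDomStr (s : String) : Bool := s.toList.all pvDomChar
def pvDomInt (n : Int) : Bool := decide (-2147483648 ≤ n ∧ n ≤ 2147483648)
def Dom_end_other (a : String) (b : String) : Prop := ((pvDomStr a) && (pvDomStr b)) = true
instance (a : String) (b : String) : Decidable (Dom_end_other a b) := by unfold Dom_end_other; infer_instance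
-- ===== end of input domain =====

-- B replaces A's reverse-both-strings-and-compare-indices loop by the direct
-- case-insensitive suffix test a.endswith(b) or b.endswith(a) (idiomatic; same cost).


-- ===== PORT A =====
-- the 'for i in range(l): if x[i] != y[i]: return False' loop, with early return
def end_other_loop (x y : List Char) : List Int → Bool
  | [] => true
  | i :: rest =>
      if PySem.List.pyGetD x i ' ' != PySem.List.pyGetD y i ' ' then false
      else end_other_loop x y rest

def end_other (a : String) (b : String) : Bool :=
  -- l = min(len(a), len(b))
  let l : Int := min (PySem.Str.len a) (PySem.Str.len b)
  -- x = a[::-1].lower(); y = b[::-1].lower()  (s[::-1] = reverse, PySem.Str.slice?_none_none_neg_one)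
  let x : List Char := PySem.Chars.lower a.toList.reverse
  let y : List Char := PySem.Chars.lower b.toList.reverse
  -- x[i] is in range for every i in range(l) (l ≤ both lengths), so pyGetD is exact here
  end_other_loop x y (PySem.List.pyRange 0 l 1)

-- ===== PORT B =====
def end_other_alt (a : String) (b : String) : Bool :=
  let x := PySem.Str.lower a
  let y := PySem.Str.lower b
  PySem.Str.endswith x y || PySem.Str.endswith y x

-- ===== PRECONDITION & SPEC =====
def Spec_end_other (a : String) (b : String) (out : Bool) : Prop := out = end_other_alt a b
instance (a : String) (b : String) (out : Bool) : Decidable (Spec_end_other a b out) := by unfold Spec_end_other; infer_instance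

-- ===== CLAIM (what is proved, stated in full; the proofs are below) =====
def Claim_equal_end_other : Prop := ∀ (a : String) (b : String), Dom_end_other a b → Spec_end_other a b (end_other a b)

-- ===== LEMMAS AND PROOFS =====

-- the early-return loop is an 'all' over the index list
theorem end_other_loop_eq_all (x y : List Char) (is : List Int) :
    end_other_loop x y is =
      is.all (fun i => PySem.List.pyGetD x i ' ' == PySem.List.pyGetD y i ' ') := by
  induction is with
  | nil => rfl
  | cons i rest ih =>
      cases h : (PySem.List.pyGetD x i ' ' == PySem.List.pyGetD y i ' ') with
      | false => simp [end_other_loop, bne, h]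
      | true => simp [end_other_loop, bne, h, ih]

-- the loop over range(n) tests equality of the n-prefixes (n within both lengths)
theorem end_other_loop_range (x y : List Char) (n : Nat)
    (hx : n ≤ x.length) (hy : n ≤ y.length) :
    end_other_loop x y (PySem.List.pyRange 0 (n : Int) 1) =
      decide (x.take n = y.take n) := by
  rw [end_other_loop_eq_all, PySem.List.pyRange_one]
  simp only [zero_add, Int.sub_zero, Int.toNat_natCast, List.all_map, Function.comp_def,
    PySem.List.pyGetD_natCast]
  rw [Bool.eq_iff_iff]
  simp only [List.all_eq_true, List.mem_range, beq_iff_eq, decide_eq_true_eq]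
  constructor
  · intro hall
    apply List.ext_getElem
    · simp [List.length_take, Nat.min_eq_left hx, Nat.min_eq_left hy]
    · intro k h1 h2
      have hkn : k < n := by simpa [List.length_take, Nat.min_eq_left hx] using h1
      have hx' : k < x.length := lt_of_lt_of_le hkn hx
      have hy' : k < y.length := lt_of_lt_of_le hkn hy
      have := hall k hkn
      simpa [List.getElem_take, List.getD_eq_getElem?_getD, List.getElem?_eq_getElem, hx', hy']
        using this
  · intro he k hkn
    have := congrArg (fun l => l.getD k ' ') he
    simpa [List.getD_eq_getElem?_getD, List.getElem?_take, hkn] using this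

-- prefixes-of-reverses of the shorter length test the suffix relation, as a disjunction
theorem key_suffix (u v : List Char) (h : u.length ≤ v.length) :
    (u.reverse.take (min u.length v.length) = v.reverse.take (min u.length v.length)) ↔
      (v <:+ u ∨ u <:+ v) := by
  rw [Nat.min_eq_left h]
  constructor
  · intro he
    right
    rw [← List.reverse_prefix]
    rw [List.take_of_length_le (by simp)] at he
    rw [he]
    exact List.take_prefix _ _
  · intro hc
    rcases hc with hvu | huv
    · have hlen : v.length ≤ u.length := hvu.length_le
      have heq : v = u := hvu.eq_of_length (le_antisymm hlen h)
      rw [heq]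
    · have hp : u.reverse <+: v.reverse := List.reverse_prefix.mpr huv
      obtain ⟨t, ht⟩ := hp
      rw [← ht, List.take_append_of_le_length (by simp)]

-- the propositional form of B
theorem alt_eq_decide (a b : String) :
    end_other_alt a b =
      decide ((PySem.Chars.lower b.toList <:+ PySem.Chars.lower a.toList) ∨
              (PySem.Chars.lower a.toList <:+ PySem.Chars.lower b.toList)) := by
  unfold end_other_alt
  simp only [PySem.Str.endswith_eq, PySem.Str.toList_lower]
  rw [Bool.eq_iff_iff]
  simp [PySem.Chars.endswith_iff]

-- ===== VERDICT (by name: the statement is the Claim_ definition above) =====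
theorem end_other_spec : Claim_equal_end_other := by
  intro a b _
  unfold Spec_end_other end_other
  rw [alt_eq_decide]
  have hxa : PySem.Chars.lower a.toList.reverse = (PySem.Chars.lower a.toList).reverse := by
    simp [PySem.Chars.lower]
  have hxb : PySem.Chars.lower b.toList.reverse = (PySem.Chars.lower b.toList).reverse := by
    simp [PySem.Chars.lower]
  have hmin : min (PySem.Str.len a) (PySem.Str.len b) =
      ((min (PySem.Chars.lower a.toList).length (PySem.Chars.lower b.toList).length : Nat) : Int) := by
    simp [PySem.Str.len_eq, PySem.Chars.lower]
  rw [hxa, hxb, hmin,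
      end_other_loop_range _ _ _ (by simp) (by simp), decide_eq_decide]
  rcases le_total (PySem.Chars.lower a.toList).length (PySem.Chars.lower b.toList).length with h | h
  · exact key_suffix _ _ h
  · rw [Nat.min_comm]
    refine Iff.trans ?_ or_comm
    have hiff := key_suffix _ _ h
    refine Iff.trans ?_ hiff
    constructor <;> exact fun he => he.symm
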